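-- pv_equiv track=rewrite | github.com/HenokMekuanint/Competitiveprogramming | planets.py | planets
-- ===== SOURCE A (Python) =====
-- def planets(com,orbits):
--     from collections import defaultdict
--     dicti=defaultdict(int)
--     ans=0
--     for i in orbits:
--         dicti[i]+=1
--     for j in dicti:
--         if dicti[j]>=com:
--             ans+=com
--         else:
--             ans+=dicti[j]
--     return ans
-- ===== SOURCE B (Python) =====
-- from itertools import groupby
--
-- def planets(com, orbits):
--     ans = 0
--     for _, g in groupby(sorted(orbits)):
--         ans += min(sum(1 for _ in g), com)
--     return ans
-- ===== Notes on version B (the rewrite author's own statement) =====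
-- stated objective: alternative
-- what changed: Replaces the defaultdict frequency count plus a second loop over the dict with sort-then-groupby: iterate over maximal runs of equal values in the sorted list and add min(run length, com) per run.
import Mathlib
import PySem

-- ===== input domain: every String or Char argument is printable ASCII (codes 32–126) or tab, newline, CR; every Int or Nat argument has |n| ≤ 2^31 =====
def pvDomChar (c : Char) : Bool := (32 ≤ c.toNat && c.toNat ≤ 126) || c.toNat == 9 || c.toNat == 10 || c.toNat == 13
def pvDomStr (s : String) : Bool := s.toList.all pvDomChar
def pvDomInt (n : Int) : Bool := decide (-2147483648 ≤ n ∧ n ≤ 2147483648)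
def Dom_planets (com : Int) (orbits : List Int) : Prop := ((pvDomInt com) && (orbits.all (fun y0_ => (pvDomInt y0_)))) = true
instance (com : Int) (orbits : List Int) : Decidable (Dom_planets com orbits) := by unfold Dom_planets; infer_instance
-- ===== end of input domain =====

-- B replaces the frequency-dict count with sort-then-group over maximal runs of equal values; alternative decomposition, same result.


-- ===== PORT A =====
def planets (com : Int) (orbits : List Int) : Int :=
  let dicti := orbits.foldl (fun d i => d.modify i 0 (· + 1)) (PySem.Dict.empty : PySem.Dict Int Int)
  dicti.keys.foldl (fun ans j => if dicti.getD j 0 ≥ com then ans + com else ans + dicti.getD j 0) 0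

-- ===== PORT B =====
-- itertools.groupby on the sorted list: consume one maximal run of equal leading values per step
def grpSum (com : Int) : List Int → Int
  | [] => 0
  | x :: xs =>
    min (((xs.takeWhile (· == x)).length : Int) + 1) com + grpSum com (xs.dropWhile (· == x))
termination_by l => l.length
decreasing_by
  simp only [List.length_cons]
  exact Nat.lt_succ_of_le (List.length_dropWhile_le _ _)

def planets_alt (com : Int) (orbits : List Int) : Int :=
  grpSum com (PySem.List.sorted orbits (fun x => x) false)

-- ===== PRECONDITION & SPEC =====
def Spec_planets (com : Int) (orbits : List Int) (out : Int) : Prop := out = planets_alt com orbits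
instance (com : Int) (orbits : List Int) (out : Int) : Decidable (Spec_planets com orbits out) := by unfold Spec_planets; infer_instance

-- ===== CLAIM (what is proved, stated in full; the proofs are below) =====
def Claim_equal_planets : Prop := ∀ (com : Int) (orbits : List Int), Dom_planets com orbits → Spec_planets com orbits (planets com orbits)

-- ===== LEMMAS AND PROOFS =====

-- A's side: fold over the counter's keys is the sum of min(count, com) over the distinct values
theorem planets_eq_sum (com : Int) (orbits : List Int) :
    planets com orbits
      = ((PySem.Set.ofList orbits).map (fun k => min ((orbits.count k : Int)) com)).sum := by
  unfold planets
  rw [← PySem.Dict.counter_eq_foldl]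
  have hk : (PySem.Dict.counter orbits : PySem.Dict Int Int).keys = PySem.Set.ofList orbits :=
    PySem.Dict.keys_counter orbits
  simp only [hk]
  have hstep : ∀ (acc : Int) (l : List Int),
      l.foldl (fun ans j => if (PySem.Dict.counter orbits).getD j 0 ≥ com then ans + com
                            else ans + (PySem.Dict.counter orbits).getD j 0) acc
        = acc + (l.map (fun k => min ((orbits.count k : Int)) com)).sum := by
    intro acc l
    induction l generalizing acc with
    | nil => simp
    | cons y ys ih =>
      simp only [List.foldl_cons, List.map_cons, List.sum_cons, ih]
      rw [PySem.Dict.getD_counter]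
      rcases le_or_gt com ((orbits.count y : Int)) with h | h
      · rw [if_pos h, min_eq_right h]; ring
      · rw [if_neg (by omega), min_eq_left (by omega)]; ring
  rw [hstep]; ring

-- run-heads: the distinct values of l, one per maximal run
def runHeads : List Int → List Int
  | [] => []
  | x :: xs => x :: runHeads (xs.dropWhile (· == x))
termination_by l => l.length
decreasing_by
  simp only [List.length_cons]
  exact Nat.lt_succ_of_le (List.length_dropWhile_le _ _)

theorem dropWhile_gt {x : Int} {xs : List Int} (h : (x :: xs).Pairwise (· ≤ ·)) :
    ∀ y ∈ xs.dropWhile (· == x), x < y := by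
  intro y hy
  have hle : ∀ z ∈ xs, x ≤ z := (List.pairwise_cons.mp h).1
  have hsubl : (xs.dropWhile (· == x)).Sublist xs := List.dropWhile_sublist _
  cases hd : xs.dropWhile (· == x) with
  | nil => simp [hd] at hy
  | cons d ds =>
    have hdne : (d == x) = false := by
      have := List.head_dropWhile_not (· == x) (l := xs) (by simp [hd])
      simpa [hd] using this
    have hdx : d ≠ x := by simpa using hdne
    have hxd : x < d := lt_of_le_of_ne (hle d (hsubl.mem (by simp [hd]))) (Ne.symm hdx)
    have hpw : (d :: ds).Pairwise (· ≤ ·) :=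
      List.Pairwise.sublist (hd ▸ hsubl) (List.pairwise_cons.mp h).2
    rw [hd] at hy
    rcases List.mem_cons.mp hy with rfl | hyds
    · exact hxd
    · exact lt_of_lt_of_le hxd ((List.pairwise_cons.mp hpw).1 y hyds)

theorem takeWhile_eq {x : Int} (xs : List Int) :
    ∀ y ∈ xs.takeWhile (· == x), y = x := by
  intro y hy
  have := List.mem_takeWhile_imp hy
  simpa using this

-- B's side, on a sorted list: grpSum is the sum of min(count, com) over the run heads,
-- the run heads are exactly the distinct values, and they are Nodup
theorem grpSum_spec (com : Int) :
    ∀ (l : List Int), l.Pairwise (· ≤ ·) →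
      grpSum com l = ((runHeads l).map (fun k => min ((l.count k : Int)) com)).sum ∧
      (runHeads l).Nodup ∧ (∀ y, y ∈ runHeads l ↔ y ∈ l) := by
  intro l
  induction l using runHeads.induct with
  | case1 => simp [grpSum, runHeads]
  | case2 x xs ih =>
    intro hpw
    set t := xs.takeWhile (· == x) with ht
    set d := xs.dropWhile (· == x) with hd
    have hsplit : t ++ d = xs := List.takeWhile_append_dropWhile ..
    have hdgt : ∀ y ∈ d, x < y := dropWhile_gt hpw
    have hdpw : d.Pairwise (· ≤ ·) :=
      List.Pairwise.sublist (List.dropWhile_sublist _) (List.pairwise_cons.mp hpw).2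
    obtain ⟨ihsum, ihnd, ihmem⟩ := ih hdpw
    have hcount_x : xs.count x = t.length := by
      rw [← hsplit, List.count_append]
      have h1 : t.count x = t.length := by
        rw [List.count_eq_length]
        intro y hy; exact ((takeWhile_eq xs y hy) ▸ rfl)
      have h2 : d.count x = 0 := by
        rw [List.count_eq_zero]
        intro hx; exact absurd (hdgt x hx) (lt_irrefl x)
      omega
    have hcount_ne : ∀ k ∈ runHeads d, (x :: xs).count k = d.count k := by
      intro k hk
      have hkd : k ∈ d := (ihmem k).mp hk
      have hkx : x < k := hdgt k hkd
      rw [List.count_cons, ← hsplit, List.count_append]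
      have h1 : t.count k = 0 := by
        rw [List.count_eq_zero]
        intro hkt
        exact absurd ((takeWhile_eq xs k hkt) ▸ hkx) (lt_irrefl x)
      have h2 : (k == x) = false := by
        simp only [beq_eq_false_iff_ne]; omega
      simp [h1]
      omega
    refine ⟨?_, ?_, ?_⟩
    · show grpSum com (x :: xs) = _
      rw [grpSum]
      simp only [runHeads, List.map_cons, List.sum_cons, ← ht, ← hd]
      congr 1
      · congr 1
        rw [List.count_cons_self, hcount_x]
        push_cast; ring
      · rw [ihsum]
        congr 1
        apply List.map_congr_left
        intro k hk
        rw [hcount_ne k hk]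
    · show (runHeads (x :: xs)).Nodup
      rw [runHeads]
      simp only [← hd]
      refine List.nodup_cons.mpr ⟨?_, ihnd⟩
      intro hx
      exact absurd (hdgt x ((ihmem x).mp hx)) (lt_irrefl x)
    · intro y
      rw [runHeads]
      simp only [← hd, List.mem_cons, ihmem]
      constructor
      · rintro (rfl | hyd)
        · exact Or.inl rfl
        · exact Or.inr ((List.dropWhile_sublist _).mem hyd)
      · rintro (rfl | hyxs)
        · exact Or.inl rfl
        · by_cases hyx : y = x
          · exact Or.inl hyx
          · right
            rw [← hsplit, List.mem_append] at hyxs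
            rcases hyxs with hyt | hyd
            · exact absurd (takeWhile_eq xs y hyt) hyx
            · exact hyd

-- two Nodup lists with the same members have equal map-sums
theorem sum_map_eq_of_same_mem (f : Int → Int) {s t : List Int}
    (hs : s.Nodup) (ht : t.Nodup) (h : ∀ y, y ∈ s ↔ y ∈ t) :
    (s.map f).sum = (t.map f).sum := by
  have hperm : s.Perm t := (List.perm_ext_iff_of_nodup hs ht).mpr h
  exact (hperm.map f).sum_eq

-- ===== VERDICT (by name: the statement is the Claim_ definition above) =====
theorem planets_spec : Claim_equal_planets := by
  intro com orbits _
  unfold Spec_planets planets_alt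
  set s := PySem.List.sorted orbits (fun x => x) false with hs
  have hpw : s.Pairwise (· ≤ ·) := by
    simpa using PySem.List.sorted_pairwise orbits (fun x => x)
  obtain ⟨hsum, hnd, hmem⟩ := grpSum_spec com s hpw
  have hperm : s.Perm orbits := PySem.List.sorted_perm ..
  rw [planets_eq_sum, hsum]
  have hcnt : ∀ k, s.count k = orbits.count k := fun k => hperm.count_eq k
  have : ((runHeads s).map (fun k => min ((s.count k : Int)) com)) =
         ((runHeads s).map (fun k => min ((orbits.count k : Int)) com)) := by
    apply List.map_congr_left; intro k _; rw [hcnt]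
  rw [this]
  exact sum_map_eq_of_same_mem _ (PySem.Set.nodup_ofList _) hnd
    (fun y => by rw [PySem.Set.mem_ofList, hmem, hperm.mem_iff])
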